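-- pv_equiv track=rewrite | github.com/xy2333/Leetcode | leetcode/2019网易笔试.py | findminodd
-- ===== SOURCE A (Python) =====
-- def findminodd(lst):
-- 	if len(lst) == 0:
-- 		return None,None
-- 	index = minodd = None
-- 	for i in range(len(lst)):
-- 		if lst[i]%2 == 0:
-- 			if minodd is None or minodd > lst[i]:
-- 				minodd = lst[i]
-- 				index = i+1
-- 	return index,minodd
-- ===== SOURCE B (Python) =====
-- def findminodd(lst):
--     # stage 1: keep only the even values (indices are dropped entirely)
--     evens = [x for x in lst if x % 2 == 0]
--     if not evens:
--         return None, None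
--     # stage 2: the minimum even value
--     m = min(evens)
--     # stage 3: recover its first position in the original list
--     return lst.index(m) + 1, m
-- ===== Notes on version B (the rewrite author's own statement) =====
-- stated objective: simpler
-- what changed: B drops the fused scan with (index, min) state entirely: it filters the even values, takes min(evens), then recovers the 1-based position with lst.index on the original list.
import Mathlib
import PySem

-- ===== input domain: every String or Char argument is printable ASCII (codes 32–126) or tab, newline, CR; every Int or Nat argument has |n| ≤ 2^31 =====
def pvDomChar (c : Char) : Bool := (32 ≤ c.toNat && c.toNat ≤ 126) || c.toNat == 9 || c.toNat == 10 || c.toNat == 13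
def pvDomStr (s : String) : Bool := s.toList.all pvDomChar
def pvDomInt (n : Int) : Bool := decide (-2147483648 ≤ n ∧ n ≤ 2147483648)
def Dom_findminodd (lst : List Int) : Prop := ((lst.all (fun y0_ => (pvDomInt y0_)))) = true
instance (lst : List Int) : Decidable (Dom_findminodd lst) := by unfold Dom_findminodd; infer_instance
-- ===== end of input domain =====

-- B: filter even values, min of values, then lst.index to recover the position — no index bookkeeping (simpler decomposition, same O(n)).


-- ===== PORT A =====
def findminodd (lst : List Int) : Option Int × Option Int :=
  if lst.length = 0 then (none, none)
  else
    (PySem.List.pyRange 0 lst.length 1).foldl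
      (fun st i =>
        let x := PySem.List.pyGetD lst i 0
        if PySem.Int.mod x 2 == 0 then
          match st.2 with
          | none => (some (i + 1), some x)
          | some m => if m > x then (some (i + 1), some x) else st
        else st)
      (none, none)

-- ===== PORT B =====
-- Source B's 'evens' variable is inlined as the filter expression; otherwise line for line:
-- min(evens) → min? with identity key, lst.index(m) → index? (Python would raise on the
-- unreachable none branch: m is drawn from evens ⊆ lst).
def findminodd_alt (lst : List Int) : Option Int × Option Int :=
  match PySem.List.min? (lst.filter (fun x => PySem.Int.mod x 2 == 0)) (fun x => x) with
  | none => (none, none)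
  | some m =>
    match PySem.List.index? lst m with
    | none => (none, none)
    | some i => (some ((i : Int) + 1), some m)

-- ===== PRECONDITION & SPEC =====
def Spec_findminodd (lst : List Int) (out : Option Int × Option Int) : Prop := out = findminodd_alt lst
instance (lst : List Int) (out : Option Int × Option Int) : Decidable (Spec_findminodd lst out) := by unfold Spec_findminodd; infer_instance

-- ===== CLAIM (what is proved, stated in full; the proofs are below) =====
def Claim_equal_findminodd : Prop := ∀ (lst : List Int), Dom_findminodd lst → Spec_findminodd lst (findminodd lst)

-- ===== LEMMAS AND PROOFS =====

-- A's running state as a (value, 1-based index) option, and its step/merge algebra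
def pvStep : Option (Int × Int) → (Int × Int) → Option (Int × Int)
  | none, x => some x
  | some m, x => if x.1 < m.1 then some x else some m

def pvMerge : Option (Int × Int) → Option (Int × Int) → Option (Int × Int)
  | none, r => r
  | some m, none => some m
  | some m, some x => if x.1 < m.1 then some x else some m

def pvEncode : Option (Int × Int) → Option Int × Option Int
  | none => (none, none)
  | some (v, i) => (some i, some v)

-- the even (value, 1-based index) pairs, enumerated from k
def pvPairs (k : Int) (xs : List Int) : List (Int × Int) :=
  (PySem.List.enumerate xs k).filterMap
    (fun p => if PySem.Int.mod p.2 2 == 0 then some (p.2, p.1 + 1) else none)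

-- recursive specification of the first-minimal even pair
def pvSpec : List Int → Int → Option (Int × Int)
  | [], _ => none
  | x :: xs, k =>
      if PySem.Int.mod x 2 == 0 then pvMerge (some (x, k + 1)) (pvSpec xs (k + 1))
      else pvSpec xs (k + 1)

theorem pvFilter_cons_pos (x : Int) (xs : List Int) (he : (PySem.Int.mod x 2 == 0) = true) :
    (x :: xs).filter (fun y => PySem.Int.mod y 2 == 0)
      = x :: xs.filter (fun y => PySem.Int.mod y 2 == 0) := by
  simp only [List.filter_cons, he, if_true]

theorem pvFilter_cons_neg (x : Int) (xs : List Int) (he : ¬ (PySem.Int.mod x 2 == 0) = true) :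
    (x :: xs).filter (fun y => PySem.Int.mod y 2 == 0)
      = xs.filter (fun y => PySem.Int.mod y 2 == 0) := by
  simp only [List.filter_cons, he]
  rfl

theorem pvMerge_assoc (a b c : Option (Int × Int)) :
    pvMerge (pvMerge a b) c = pvMerge a (pvMerge b c) := by
  rcases a with _ | ⟨va, ia⟩
  · rfl
  rcases b with _ | ⟨vb, ib⟩
  · rfl
  rcases c with _ | ⟨vc, ic⟩
  · by_cases h : vb < va <;> simp [pvMerge, h]
  · by_cases h1 : vb < va <;> by_cases h2 : vc < vb <;> by_cases h3 : vc < va <;>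
      first
      | (exfalso; omega)
      | simp [pvMerge, h1, h2, h3]

theorem pvStep_eq_merge (b : Option (Int × Int)) (x : Int × Int) :
    pvStep b x = pvMerge b (some x) := by
  cases b <;> rfl

theorem pvFold_merge (L : List (Int × Int)) (b : Option (Int × Int)) :
    L.foldl pvStep b = pvMerge b (L.foldl pvStep none) := by
  induction L generalizing b with
  | nil => cases b <;> rfl
  | cons x L ih =>
    simp only [List.foldl_cons]
    rw [ih (pvStep b x), ih (pvStep none x), pvStep_eq_merge, pvStep_eq_merge,
      pvMerge_assoc]
    rfl

-- B's filtered fold equals the recursive spec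
theorem pvFold_pairs (xs : List Int) (k : Int) :
    (pvPairs k xs).foldl pvStep none = pvSpec xs k := by
  unfold pvPairs
  induction xs generalizing k with
  | nil => rfl
  | cons x xs ih =>
    simp only [PySem.List.enumerate_cons, List.filterMap_cons, pvSpec]
    by_cases he : PySem.Int.mod x 2 == 0
    · simp only [he, if_pos, List.foldl_cons]
      rw [show pvStep none (x, k + 1) = some (x, k + 1) from rfl,
        pvFold_merge, ih (k + 1)]
    · simp only [if_neg he]
      exact ih (k + 1)

-- the generic loop correspondence: A's fused step over enumerated pairs = pvStep fold on filtered pairs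
theorem pvLoopCorr (es : List (Int × Int)) (b : Option (Int × Int)) :
    es.foldl
      (fun st (p : Int × Int) =>
        if PySem.Int.mod p.2 2 == 0 then
          match st.2 with
          | none => (some (p.1 + 1), some p.2)
          | some m => if m > p.2 then (some (p.1 + 1), some p.2) else st
        else st)
      (pvEncode b)
    = pvEncode
        ((es.filterMap (fun p => if PySem.Int.mod p.2 2 == 0 then some (p.2, p.1 + 1) else none)).foldl
          pvStep b) := by
  induction es generalizing b with
  | nil => rfl
  | cons p es ih =>
    simp only [List.foldl_cons, List.filterMap_cons]
    by_cases he : PySem.Int.mod p.2 2 == 0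
    · simp only [he, if_pos, List.foldl_cons, pvStep]
      cases b with
      | none => exact ih (some (p.2, p.1 + 1))
      | some q =>
        obtain ⟨v, idx⟩ := q
        simp only [pvEncode, gt_iff_lt]
        by_cases hlt : p.2 < v
        · simp only [if_pos hlt]
          exact ih (some (p.2, p.1 + 1))
        · simp only [if_neg hlt]
          exact ih (some (v, idx))
    · simp only [if_neg he]
      exact ih b

theorem pvSpec_none (xs : List Int) (k : Int) :
    pvSpec xs k = none ↔ xs.filter (fun x => PySem.Int.mod x 2 == 0) = [] := by
  induction xs generalizing k with
  | nil => simp [pvSpec]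
  | cons x xs ih =>
    simp only [pvSpec]
    by_cases he : PySem.Int.mod x 2 == 0
    · rw [if_pos he, pvFilter_cons_pos x xs he]
      constructor
      · intro h
        exfalso
        cases hs : pvSpec xs (k + 1) with
        | none =>
          rw [hs] at h
          simp only [pvMerge] at h
          exact Option.some_ne_none _ h
        | some q =>
          rw [hs] at h
          simp only [pvMerge] at h
          split at h <;> exact Option.some_ne_none _ h
      · intro h; exact absurd h (List.cons_ne_nil _ _)
    · rw [if_neg he, pvFilter_cons_neg x xs he]
      exact ih (k + 1)

-- full characterisation of a successful pvSpec result: an even value, minimal among the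
-- even elements, whose first occurrence sits at 1-based position i - k
theorem pvSpec_char (xs : List Int) (k v i : Int)
    (h : pvSpec xs k = some (v, i)) :
    v ∈ xs.filter (fun x => PySem.Int.mod x 2 == 0) ∧
    (∀ y ∈ xs.filter (fun x => PySem.Int.mod x 2 == 0), v ≤ y) ∧
    ∃ j : Nat, PySem.List.index? xs v = some j ∧ i = k + (j : Int) + 1 := by
  induction xs generalizing k v i with
  | nil => simp [pvSpec] at h
  | cons x xs ih =>
    simp only [pvSpec] at h
    by_cases he : PySem.Int.mod x 2 == 0
    · rw [if_pos he] at h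
      cases hs : pvSpec xs (k + 1) with
      | none =>
        rw [hs] at h
        simp only [pvMerge, Option.some.injEq, Prod.mk.injEq] at h
        obtain ⟨rfl, rfl⟩ := h
        have hf : xs.filter (fun x => PySem.Int.mod x 2 == 0) = [] := (pvSpec_none xs (k + 1)).mp hs
        rw [pvFilter_cons_pos x xs he]
        refine ⟨List.mem_cons_self, ?_, 0, PySem.List.index?_cons_self x xs, by omega⟩
        intro y hy
        rcases List.mem_cons.mp hy with h1 | h1
        · omega
        · rw [hf] at h1; simp at h1
      | some q =>
        obtain ⟨w, j⟩ := q
        rw [hs] at h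
        obtain ⟨hwm, hwmin, jj, hidx, hji⟩ := ih (k + 1) w j hs
        simp only [pvMerge] at h
        by_cases hlt : w < x
        · rw [if_pos hlt] at h
          simp only [Option.some.injEq, Prod.mk.injEq] at h
          obtain ⟨rfl, rfl⟩ := h
          rw [pvFilter_cons_pos x xs he]
          have hne : x ≠ w := by omega
          refine ⟨List.mem_cons_of_mem x hwm, ?_, jj + 1, ?_, by push_cast; omega⟩
          · intro y hy
            rcases List.mem_cons.mp hy with h1 | h1
            · omega
            · exact hwmin y h1
          · rw [PySem.List.index?_cons_of_ne xs hne, hidx]; rfl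
        · rw [if_neg hlt] at h
          simp only [Option.some.injEq, Prod.mk.injEq] at h
          obtain ⟨rfl, rfl⟩ := h
          rw [pvFilter_cons_pos x xs he]
          refine ⟨List.mem_cons_self, ?_, 0, PySem.List.index?_cons_self x xs, by omega⟩
          intro y hy
          rcases List.mem_cons.mp hy with h1 | h1
          · omega
          · have := hwmin y h1; omega
    · rw [if_neg he] at h
      obtain ⟨hvm, hvmin, jj, hidx, hji⟩ := ih (k + 1) v i h
      have hve : (PySem.Int.mod v 2 == 0) = true := (List.mem_filter.mp hvm).2
      have hne : x ≠ v := by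
        intro hxv; rw [hxv] at he; exact he hve
      rw [pvFilter_cons_neg x xs he]
      refine ⟨hvm, hvmin, jj + 1, ?_, by push_cast; omega⟩
      rw [PySem.List.index?_cons_of_ne xs hne, hidx]; rfl

-- B computed from pvSpec
theorem pvAlt_eq (lst : List Int) : findminodd_alt lst = pvEncode (pvSpec lst 0) := by
  unfold findminodd_alt
  cases hs : pvSpec lst 0 with
  | none =>
    have hf := (pvSpec_none lst 0).mp hs
    rw [hf]
    rfl
  | some q =>
    obtain ⟨v, i⟩ := q
    obtain ⟨hvm, hvmin, j, hidx, hji⟩ := pvSpec_char lst 0 v i hs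
    have hne : lst.filter (fun x => PySem.Int.mod x 2 == 0) ≠ [] := by
      intro h; rw [h] at hvm; simp at hvm
    cases hm : PySem.List.min? (lst.filter (fun x => PySem.Int.mod x 2 == 0)) (fun x => x) with
    | none => exact absurd ((PySem.List.min?_eq_none_iff _ _).mp hm) hne
    | some w =>
      have hwm := PySem.List.min?_mem hm
      have h1 : w ≤ v := PySem.List.min?_isMin hm v hvm
      have h2 : v ≤ w := hvmin w hwm
      have hvw : w = v := le_antisymm h1 h2
      subst hvw
      simp only [hidx, pvEncode, Prod.mk.injEq, Option.some.injEq]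
      exact ⟨by omega, by trivial⟩

-- ===== VERDICT (by name: the statement is the Claim_ definition above) =====
theorem findminodd_spec : Claim_equal_findminodd := by
  intro lst _
  unfold Spec_findminodd findminodd
  rw [pvAlt_eq]
  rw [← pvFold_pairs lst 0]
  have h := pvLoopCorr (PySem.List.enumerate lst 0) none
  rw [PySem.List.enumerate_eq_map_pyRange lst 0, List.foldl_map, List.filterMap_map] at h
  simp only [PySem.List.len] at h
  split
  · next hlen =>
    rw [List.length_eq_zero_iff.mp hlen]
    rfl
  · conv_lhs => rw [show ((none, none) : Option Int × Option Int) = pvEncode none from rfl]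
    rw [h]
    congr 1
    unfold pvPairs
    rw [PySem.List.enumerate_eq_map_pyRange lst 0, List.filterMap_map]
    rfl
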